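-- pv_equiv track=rewrite | github.com/Dixter999/trading-TFG | src/gym_trading_env/validators/future_leak.py | _find_overlapping_timestamps
-- ===== SOURCE A (Python) =====
-- from typing import Dict, Any, List, Set
--
-- def _find_overlapping_timestamps(
--     data1: List[Dict[str, Any]], data2: List[Dict[str, Any]]
-- ) -> List[str]:
--     """
--     Find timestamps that appear in both datasets.
--
--     Args:
--         data1: First dataset
--         data2: Second dataset
--
--     Returns:
--         List of overlapping timestamps
--     """
--     # Extract timestamps from both datasets
--     timestamps1: Set[str] = set()
--     timestamps2: Set[str] = set()
--
--     for item in data1: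
--         if "timestamp" in item:
--             timestamps1.add(item["timestamp"])
--
--     for item in data2:
--         if "timestamp" in item:
--             timestamps2.add(item["timestamp"])
--
--     # Find intersection
--     overlaps = timestamps1.intersection(timestamps2)
--
--     return sorted(list(overlaps))
-- ===== SOURCE B (Python) =====
-- def _find_overlapping_timestamps(data1, data2):
--     # sort-merge join: sort both timestamp lists, then a two-pointer merge
--     # that emits each common value once (skipping duplicates), so the output
--     # is already sorted and distinct -- no sets, no final sort.
--     ts1 = sorted(item["timestamp"] for item in data1 if "timestamp" in item)
--     ts2 = sorted(item["timestamp"] for item in data2 if "timestamp" in item)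
--     out = []
--     i = j = 0
--     n1, n2 = len(ts1), len(ts2)
--     while i < n1 and j < n2:
--         a, b = ts1[i], ts2[j]
--         if a < b:
--             i += 1
--         elif b < a:
--             j += 1
--         else:
--             out.append(a)
--             while i < n1 and ts1[i] == a:
--                 i += 1
--             while j < n2 and ts2[j] == a:
--                 j += 1
--     return out
-- ===== Notes on version B (the rewrite author's own statement) =====
-- stated objective: alternative
-- what changed: Replaces A's hash-set intersection plus final sort with a sort-merge join: both timestamp lists are sorted, then a two-pointer merge emits each common value once in order, so no sets and no final sort are used.
import Mathlib
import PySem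

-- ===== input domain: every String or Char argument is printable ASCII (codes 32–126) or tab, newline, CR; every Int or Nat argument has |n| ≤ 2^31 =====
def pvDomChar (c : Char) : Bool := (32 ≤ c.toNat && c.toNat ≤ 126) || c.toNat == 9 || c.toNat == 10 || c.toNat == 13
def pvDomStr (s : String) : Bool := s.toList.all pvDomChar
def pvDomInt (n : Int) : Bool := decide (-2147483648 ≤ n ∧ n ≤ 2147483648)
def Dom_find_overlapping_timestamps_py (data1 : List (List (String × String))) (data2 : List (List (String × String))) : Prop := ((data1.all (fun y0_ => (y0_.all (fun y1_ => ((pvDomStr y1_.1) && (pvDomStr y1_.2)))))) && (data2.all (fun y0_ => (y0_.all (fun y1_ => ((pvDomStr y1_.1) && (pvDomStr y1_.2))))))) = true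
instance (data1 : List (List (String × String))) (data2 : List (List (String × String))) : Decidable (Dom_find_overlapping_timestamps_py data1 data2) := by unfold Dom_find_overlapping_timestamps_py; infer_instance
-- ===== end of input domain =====

-- B replaces A's set-intersection-then-sort with a sort-merge join: both timestamp lists are sorted and a two-pointer merge emits each common value once in order (alternative algorithm, no speed claim).


-- ===== PORT A =====
-- literal port of A: build the set of timestamps of each dataset, intersect, sort
def find_overlapping_timestamps_py (data1 : List (List (String × String))) (data2 : List (List (String × String))) : List String :=
  let timestamps1 : PySem.Set String :=
    data1.foldl (fun s item =>
      if (PySem.Dict.mk item).contains "timestamp" then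
        PySem.Set.add s ((PySem.Dict.mk item).getD "timestamp" "")
      else s) PySem.Set.empty
  let timestamps2 : PySem.Set String :=
    data2.foldl (fun s item =>
      if (PySem.Dict.mk item).contains "timestamp" then
        PySem.Set.add s ((PySem.Dict.mk item).getD "timestamp" "")
      else s) PySem.Set.empty
  let overlaps := PySem.Set.inter timestamps1 timestamps2
  PySem.List.sorted overlaps (fun x => x) false

-- ===== PORT B =====
-- Source B's inner skip loops 'while i < n1 and ts1[i] == a: i += 1': drop the leading run equal to a
def pvSkip (a : String) : List String → List String
  | [] => []
  | x :: xs => if x = a then pvSkip a xs else x :: xs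

theorem pvSkip_length_le (a : String) (l : List String) : (pvSkip a l).length ≤ l.length := by
  induction l with
  | nil => simp [pvSkip]
  | cons x xs ih =>
    simp only [pvSkip]
    split
    · exact Nat.le_trans ih (Nat.le_succ _)
    · exact Nat.le_refl _

-- Source B's two-pointer merge loop over the two sorted lists (the index pair (i, j) becomes the pair of remaining suffixes)
def pvMerge : List String → List String → List String
  | [], _ => []
  | _ :: _, [] => []
  | x :: xs, y :: ys =>
    if x < y then pvMerge xs (y :: ys)
    else if y < x then pvMerge (x :: xs) ys
    else x :: pvMerge (pvSkip x xs) (pvSkip y ys)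
termination_by l1 l2 => l1.length + l2.length
decreasing_by
  all_goals (try have h1 := pvSkip_length_le x xs)
  all_goals (try have h2 := pvSkip_length_le y ys)
  all_goals simp
  all_goals omega

-- port of Source B: sort each dataset's timestamp list, then merge
def find_overlapping_timestamps_py_alt (data1 : List (List (String × String))) (data2 : List (List (String × String))) : List String :=
  let ts1 := PySem.List.sorted (data1.filterMap (fun item => (PySem.Dict.mk item).get? "timestamp")) (fun x => x) false
  let ts2 := PySem.List.sorted (data2.filterMap (fun item => (PySem.Dict.mk item).get? "timestamp")) (fun x => x) false
  pvMerge ts1 ts2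

-- ===== PRECONDITION & SPEC =====
def Spec_find_overlapping_timestamps_py (data1 : List (List (String × String))) (data2 : List (List (String × String))) (out : List String) : Prop := out = find_overlapping_timestamps_py_alt data1 data2
instance (data1 : List (List (String × String))) (data2 : List (List (String × String))) (out : List String) : Decidable (Spec_find_overlapping_timestamps_py data1 data2 out) := by unfold Spec_find_overlapping_timestamps_py; infer_instance

-- ===== CLAIM (what is proved, stated in full; the proofs are below) =====
def Claim_equal_find_overlapping_timestamps_py : Prop := ∀ (data1 : List (List (String × String))) (data2 : List (List (String × String))), Dom_find_overlapping_timestamps_py data1 data2 → Spec_find_overlapping_timestamps_py data1 data2 (find_overlapping_timestamps_py data1 data2)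

-- ===== LEMMAS AND PROOFS =====

-- A's collecting step written as a match on get? (proof normal form)
def pvCollectStep (s : PySem.Set String) (item : List (String × String)) : PySem.Set String :=
  match (PySem.Dict.mk item).get? "timestamp" with
  | some v => PySem.Set.add s v
  | none => s

theorem pv_stepA_eq (s : PySem.Set String) (item : List (String × String)) :
    (if (PySem.Dict.mk item).contains "timestamp" then
        PySem.Set.add s ((PySem.Dict.mk item).getD "timestamp" "")
      else s) = pvCollectStep s item := by
  cases h : (PySem.Dict.mk item).get? "timestamp" with
  | none => simp [pvCollectStep, PySem.Dict.contains_eq_isSome_get?, h]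
  | some v => simp [pvCollectStep, PySem.Dict.contains_eq_isSome_get?, PySem.Dict.getD_eq_get?_getD, h]

theorem pv_mem_collect (l : List (List (String × String))) (s : PySem.Set String) (y : String) :
    (y ∈ l.foldl pvCollectStep s)
    ↔ y ∈ s ∨ ∃ item ∈ l, (PySem.Dict.mk item).get? "timestamp" = some y := by
  induction l generalizing s with
  | nil => simp
  | cons a t ih =>
    rw [List.foldl_cons, ih]
    cases h : (PySem.Dict.mk a).get? "timestamp" with
    | none => simp [pvCollectStep, h]
    | some v => simp [pvCollectStep, h, PySem.Set.mem_add]; aesop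

theorem pv_nodup_collect (l : List (List (String × String))) (s : PySem.Set String) (hs : s.Nodup) :
    (l.foldl pvCollectStep s).Nodup := by
  induction l generalizing s with
  | nil => exact hs
  | cons a t ih =>
    rw [List.foldl_cons]
    apply ih
    unfold pvCollectStep
    cases h : (PySem.Dict.mk a).get? "timestamp" with
    | none => exact hs
    | some v => exact PySem.Set.nodup_add s v hs

-- pvSkip facts
theorem pvSkip_sublist (a : String) (l : List String) : (pvSkip a l).Sublist l := by
  induction l with
  | nil => simp [pvSkip]
  | cons x xs ih =>
    simp only [pvSkip]
    split
    · exact ih.trans (List.sublist_cons_self x xs)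
    · exact List.Sublist.refl _

theorem pv_mem_pvSkip (a : String) (l : List String) (hl : l.Pairwise (· ≤ ·))
    (ha : ∀ y ∈ l, a ≤ y) (z : String) :
    z ∈ pvSkip a l ↔ z ∈ l ∧ z ≠ a := by
  induction l with
  | nil => simp [pvSkip]
  | cons x xs ih =>
    have hx : ∀ y ∈ xs, x ≤ y := (List.pairwise_cons.mp hl).1
    have hxs : xs.Pairwise (· ≤ ·) := (List.pairwise_cons.mp hl).2
    have hax : ∀ y ∈ xs, a ≤ y := fun y hy => ha y (List.mem_cons_of_mem _ hy)
    simp only [pvSkip]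
    split
    · rename_i hxa
      subst hxa
      rw [ih hxs hax]
      constructor
      · rintro ⟨hz, hne⟩; exact ⟨List.mem_cons_of_mem _ hz, hne⟩
      · rintro ⟨hz, hne⟩
        rcases List.mem_cons.mp hz with h | h
        · exact absurd h hne
        · exact ⟨h, hne⟩
    · rename_i hxa
      constructor
      · intro hz
        refine ⟨hz, ?_⟩
        intro hza; subst hza
        rcases List.mem_cons.mp hz with h | h
        · exact hxa h.symm
        · exact hxa (le_antisymm (ha x (by simp)) (hx _ h)).symm
      · exact fun h => h.1

-- all elements surviving pvSkip a (tail of a sorted a-headed list) are > a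
theorem pv_gt_of_mem_pvSkip (a : String) (l : List String)
    (hl : (a :: l).Pairwise (· ≤ ·)) (z : String) (hz : z ∈ pvSkip a l) : a < z := by
  have hx : ∀ y ∈ l, a ≤ y := (List.pairwise_cons.mp hl).1
  have hxs : l.Pairwise (· ≤ ·) := (List.pairwise_cons.mp hl).2
  have := (pv_mem_pvSkip a l hxs hx z).mp hz
  exact lt_of_le_of_ne (hx _ this.1) (Ne.symm this.2)

-- merge membership: an element is in the merge iff it is in both sorted inputs
theorem pv_mem_pvMerge (l1 l2 : List String) (h1 : l1.Pairwise (· ≤ ·)) (h2 : l2.Pairwise (· ≤ ·))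
    (z : String) : z ∈ pvMerge l1 l2 ↔ z ∈ l1 ∧ z ∈ l2 := by
  induction l1, l2 using pvMerge.induct with
  | case1 l2 => simp [pvMerge]
  | case2 x xs => simp [pvMerge]
  | case3 x xs y ys hxy ih =>
    have h1' := (List.pairwise_cons.mp h1).2
    have hy : ∀ w ∈ y :: ys, y ≤ w := by
      intro w hw
      rcases List.mem_cons.mp hw with h | h
      · subst h; exact le_refl _
      · exact (List.pairwise_cons.mp h2).1 _ h
    rw [pvMerge, if_pos hxy, ih h1' h2]
    constructor
    · rintro ⟨ha, hb⟩; exact ⟨List.mem_cons_of_mem _ ha, hb⟩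
    · rintro ⟨ha, hb⟩
      rcases List.mem_cons.mp ha with h | h
      · subst h; exact absurd (lt_of_lt_of_le hxy (hy _ hb)) (lt_irrefl _)
      · exact ⟨h, hb⟩
  | case4 x xs y ys hxy hyx ih =>
    have h2' := (List.pairwise_cons.mp h2).2
    have hx : ∀ w ∈ x :: xs, x ≤ w := by
      intro w hw
      rcases List.mem_cons.mp hw with h | h
      · subst h; exact le_refl _
      · exact (List.pairwise_cons.mp h1).1 _ h
    rw [pvMerge, if_neg hxy, if_pos hyx, ih h1 h2']
    constructor
    · rintro ⟨ha, hb⟩; exact ⟨ha, List.mem_cons_of_mem _ hb⟩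
    · rintro ⟨ha, hb⟩
      rcases List.mem_cons.mp hb with h | h
      · subst h; exact absurd (lt_of_lt_of_le hyx (hx _ ha)) (lt_irrefl _)
      · exact ⟨ha, h⟩
  | case5 x xs y ys hxy hyx ih =>
    have hxeq : x = y := le_antisymm (le_of_not_gt hyx) (le_of_not_gt hxy)
    subst hxeq
    have h1' := (List.pairwise_cons.mp h1).2
    have h2' := (List.pairwise_cons.mp h2).2
    have hs1 := List.Pairwise.sublist (pvSkip_sublist x xs) h1'
    have hs2 := List.Pairwise.sublist (pvSkip_sublist x ys) h2'
    rw [pvMerge, if_neg hxy, if_neg hyx]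
    simp only [List.mem_cons, ih hs1 hs2]
    by_cases hzx : z = x
    · subst hzx; simp
    · rw [pv_mem_pvSkip x xs h1' (List.pairwise_cons.mp h1).1, pv_mem_pvSkip x ys h2' (List.pairwise_cons.mp h2).1]
      constructor
      · rintro (h | ⟨⟨ha, _⟩, ⟨hb, _⟩⟩)
        · exact absurd h hzx
        · exact ⟨Or.inr ha, Or.inr hb⟩
      · rintro ⟨ha | ha, hb | hb⟩ <;> first
          | exact absurd ha hzx
          | exact absurd hb hzx
          | exact Or.inr ⟨⟨ha, hzx⟩, ⟨hb, hzx⟩⟩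

-- merge output is strictly increasing
theorem pv_pairwise_pvMerge (l1 l2 : List String) (h1 : l1.Pairwise (· ≤ ·)) (h2 : l2.Pairwise (· ≤ ·)) :
    (pvMerge l1 l2).Pairwise (· < ·) := by
  induction l1, l2 using pvMerge.induct with
  | case1 l2 => simp [pvMerge]
  | case2 x xs => simp [pvMerge]
  | case3 x xs y ys hxy ih =>
    rw [pvMerge, if_pos hxy]
    exact ih (List.pairwise_cons.mp h1).2 h2
  | case4 x xs y ys hxy hyx ih =>
    rw [pvMerge, if_neg hxy, if_pos hyx]
    exact ih h1 (List.pairwise_cons.mp h2).2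
  | case5 x xs y ys hxy hyx ih =>
    have hxeq : x = y := le_antisymm (le_of_not_gt hyx) (le_of_not_gt hxy)
    subst hxeq
    have h1' := (List.pairwise_cons.mp h1).2
    have h2' := (List.pairwise_cons.mp h2).2
    have hs1 := List.Pairwise.sublist (pvSkip_sublist x xs) h1'
    have hs2 := List.Pairwise.sublist (pvSkip_sublist x ys) h2'
    rw [pvMerge, if_neg hxy, if_neg hyx]
    refine List.pairwise_cons.mpr ⟨?_, ih hs1 hs2⟩
    intro z hz
    have := (pv_mem_pvMerge _ _ hs1 hs2 z).mp hz
    exact pv_gt_of_mem_pvSkip x xs h1 z this.1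

-- ===== VERDICT (by name: the statement is the Claim_ definition above) =====
theorem find_overlapping_timestamps_py_spec : Claim_equal_find_overlapping_timestamps_py := by
  intro data1 data2 _
  unfold Spec_find_overlapping_timestamps_py
  unfold find_overlapping_timestamps_py find_overlapping_timestamps_py_alt
  have hA : (fun (s : PySem.Set String) (item : List (String × String)) =>
      if (PySem.Dict.mk item).contains "timestamp" then
        PySem.Set.add s ((PySem.Dict.mk item).getD "timestamp" "")
      else s) = pvCollectStep := funext fun s => funext fun item => pv_stepA_eq s item
  simp only [hA]
  set c1 := data1.foldl pvCollectStep PySem.Set.empty with hc1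
  set c2 := data2.foldl pvCollectStep PySem.Set.empty with hc2
  set m1 := data1.filterMap (fun item => (PySem.Dict.mk item).get? "timestamp") with hm1
  set m2 := data2.filterMap (fun item => (PySem.Dict.mk item).get? "timestamp") with hm2
  set s1 := PySem.List.sorted m1 (fun x => x) false with hs1
  set s2 := PySem.List.sorted m2 (fun x => x) false with hs2
  have hp1 : s1.Pairwise (· ≤ ·) := PySem.List.sorted_pairwise m1 (fun x => x)
  have hp2 : s2.Pairwise (· ≤ ·) := PySem.List.sorted_pairwise m2 (fun x => x)
  have hplt : (pvMerge s1 s2).Pairwise (fun a b => a < b) := pv_pairwise_pvMerge s1 s2 hp1 hp2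
  have hperm : (pvMerge s1 s2).Perm (PySem.Set.inter c1 c2) := by
    have hempty : (PySem.Set.empty : PySem.Set String).Nodup := List.nodup_nil
    have hn1 : c1.Nodup := pv_nodup_collect data1 PySem.Set.empty hempty
    have hni : (PySem.Set.inter c1 c2).Nodup := PySem.Set.nodup_inter c1 c2 hn1
    have hnm : (pvMerge s1 s2).Nodup := hplt.imp (fun h => ne_of_lt h)
    rw [List.perm_ext_iff_of_nodup hnm hni]
    intro z
    rw [pv_mem_pvMerge s1 s2 hp1 hp2, PySem.Set.mem_inter,
        hs1, hs2, PySem.List.mem_sorted, PySem.List.mem_sorted,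
        hm1, hm2, List.mem_filterMap, List.mem_filterMap,
        hc1, hc2, pv_mem_collect, pv_mem_collect]
    simp only [PySem.Set.empty, List.not_mem_nil, false_or]
  exact PySem.List.sorted_eq_of_perm_of_pairwise_lt _ _ _ hperm hplt
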